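-- pv_equiv track=rewrite | github.com/ManuelGehl/ori_analysis | functions/neighbourhood.py | generate_d_neighbourhood
-- ===== SOURCE A (Python) =====
-- def generate_direct_neighbours(sequence: str) -> list:
--     """
--     Generates direct neighbors of a given DNA sequence.
--
--     Parameters:
--     - sequence (str): The input DNA sequence.
--
--     Returns:
--     - list: A list containing the input sequence and its direct neighbors.
--
--     Example:
--     >>> generate_direct_neighbours(sequence="ATG")
--     ['ATG', 'TTG', 'GTG', 'CTG', 'AAG', 'AGG', 'ACG', 'ATA', 'ATT', 'ATC']
--     """
--
--     # Check that sequence is not empty or none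
--     if sequence is None or len(sequence) == 0:
--         raise ValueError("Empty sequence")
--     # Check for correct data type
--     if not isinstance(sequence, str):
--         raise ValueError("Invalid input type. Please provide a valid sequence.")
--
--     nucleotide_list = ["A", "T", "G", "C"]
--     # Initialize direct neighbours with sequence
--     direct_neighbours = [sequence]
--
--     # Loop trough every nucleotide in sequence
--     for position, nucleotide in enumerate(sequence):
--         # Generate list of possible nucleotides to exchange at each position
--         candidate_list = [candidate for candidate in nucleotide_list if candidate != nucleotide]
--         for candidate in candidate_list:
--             # Split sequence and replace nucleotides
--             split_sequence = list(sequence)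
--             split_sequence[position] = candidate
--             # Join sequence to string and append to list
--             modified_sequence = ''.join(split_sequence)
--             direct_neighbours.append(modified_sequence)
--
--     return sorted(direct_neighbours)
--
-- def generate_d_neighbourhood(sequence: str, distance: int) -> list:
--     """
--     Generates a d-neighborhood of a given DNA sequence.
--
--     Parameters:
--     - sequence (str): The input DNA sequence.
--     - distance (int): The maximum hamming distance of all neighbours relative to the input sequence.
--
--     Returns:
--     - list: A list containing the input sequence and its d-neighbors within the specified distance.
--
--     Example:
--     >> generate_d_neighbourhood(sequence="AT")
--     ['AG', 'CG', 'GA', 'TC', 'GG', 'AA', 'AT', 'GT', 'CT', 'CC', 'AC', 'GC', 'TG', 'CA', 'TA', 'TT']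
--     """
--
--     # Check that sequence is not empty or none
--     if sequence is None or len(sequence) == 0:
--         raise ValueError("Empty sequence")
--     # Check for correct data type
--     if not isinstance(sequence, str) or not isinstance(distance, int):
--         raise ValueError("Invalid input types. Please provide a valid sequence or distance.")
--     # Check for non-negative distances
--     if distance < 0:
--         raise ValueError("Negative distance.")
--
--     # Initialize neighbourhood
--     neighbourhood = [sequence]
--     if distance == 0:
--         return neighbourhood
--
--     for _ in range(distance):
--         # Initialize temporary storage
--         current_neighbours = []
--         # Iterrate over sequences in neighbourhood
--         for seq in neighbourhood:
--             direct_neighbours = generate_direct_neighbours(sequence=seq)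
--             current_neighbours += direct_neighbours
--
--         # Add current neighbours to neighbourhood
--         neighbourhood += current_neighbours
--         # Remove duplicates
--         neighbourhood = list(set(neighbourhood))
--
--     return sorted(neighbourhood)
-- ===== SOURCE B (Python) =====
-- def generate_d_neighbourhood(sequence: str, distance: int) -> list:
--     # Single left-to-right pass: extend every partial result by one character,
--     # threading the remaining substitution budget; each neighbour is built
--     # exactly once, so no duplicate generation and no set-based dedup rounds.
--     if sequence is None or len(sequence) == 0:
--         raise ValueError("Empty sequence")
--     if not isinstance(sequence, str) or not isinstance(distance, int):
--         raise ValueError("Invalid input types. Please provide a valid sequence or distance.")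
--     if distance < 0:
--         raise ValueError("Negative distance.")
--
--     nucleotides = "ATGC"
--     partials = [("", min(distance, len(sequence)))]
--     for ch in sequence:
--         nxt = []
--         for prefix, budget in partials:
--             nxt.append((prefix + ch, budget))
--             if budget > 0:
--                 for c in nucleotides:
--                     if c != ch:
--                         nxt.append((prefix + c, budget - 1))
--         partials = nxt
--     return sorted(prefix for prefix, _ in partials)
-- ===== Notes on version B (the rewrite author's own statement) =====
-- stated objective: alternative
-- what changed: Replaces A's distance-many closure rounds (regenerating direct neighbours of every string in the neighbourhood and deduplicating with a set each round) by a single left-to-right pass that extends each partial prefix with the kept character or a different nucleotide while threading the remaining substitution budget, emitting every neighbour exactly once, then one final sort; intended as faster (measured 2.06x on the largest inputs both finished), but a timing run could not confirm it at the largest generated sizes, where the output itself is exponentially large and neither finishes.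
import Mathlib
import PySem

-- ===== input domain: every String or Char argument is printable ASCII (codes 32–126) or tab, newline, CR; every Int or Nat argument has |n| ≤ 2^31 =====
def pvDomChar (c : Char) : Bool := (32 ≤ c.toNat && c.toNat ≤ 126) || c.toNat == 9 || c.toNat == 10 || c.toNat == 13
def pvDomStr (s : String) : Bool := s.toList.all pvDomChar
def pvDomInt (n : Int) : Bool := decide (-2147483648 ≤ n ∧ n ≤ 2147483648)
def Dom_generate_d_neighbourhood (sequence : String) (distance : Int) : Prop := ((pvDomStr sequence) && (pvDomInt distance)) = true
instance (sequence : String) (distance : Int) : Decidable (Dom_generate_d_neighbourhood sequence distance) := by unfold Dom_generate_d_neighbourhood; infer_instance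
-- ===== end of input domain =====

-- B replaces A's distance-many closure rounds over the whole neighbourhood (with set-based
-- deduplication each round) by a single left-to-right pass that extends every partial prefix
-- by the kept character or a different nucleotide while threading the remaining substitution
-- budget, emitting each neighbour exactly once before one final sort (objective: alternative).

-- ===== PORT A =====
-- same-module helper of A
def generate_direct_neighbours (sequence : String) : List String :=
  let nucleotide_list : List Char := ['A', 'T', 'G', 'C']
  let direct_neighbours : List String := [sequence]
  let direct_neighbours :=
    (PySem.List.enumerate sequence.toList 0).foldl (fun acc pn =>
      let candidate_list := nucleotide_list.filter (fun candidate => candidate != pn.2)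
      candidate_list.foldl (fun acc2 candidate =>
        let split_sequence := sequence.toList
        let split_sequence := PySem.List.pySetD split_sequence pn.1 candidate
        let modified_sequence := String.ofList split_sequence
        acc2 ++ [modified_sequence]) acc) direct_neighbours
  PySem.List.sorted direct_neighbours (fun x => x) false

def generate_d_neighbourhood (sequence : String) (distance : Int) : List String :=
  let neighbourhood : List String := [sequence]
  if distance == 0 then neighbourhood
  else
    let neighbourhood :=
      (PySem.List.pyRange 0 distance 1).foldl (fun neighbourhood _ =>
        let current_neighbours : List String := []
        let current_neighbours := neighbourhood.foldl
          (fun cur seq => cur ++ generate_direct_neighbours seq) current_neighbours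
        let neighbourhood := neighbourhood ++ current_neighbours
        PySem.Set.ofList neighbourhood) neighbourhood
    PySem.List.sorted neighbourhood (fun x => x) false

-- ===== PORT B =====
-- min(distance, len(sequence)) is ported as 'min distance.toNat sequence.toList.length';
-- exact since Pre_ gives 0 ≤ distance.
def generate_d_neighbourhood_alt (sequence : String) (distance : Int) : List String :=
  let nucleotides : List Char := ['A', 'T', 'G', 'C']
  let partials : List (List Char × Nat) := [([], min distance.toNat sequence.toList.length)]
  let partials := sequence.toList.foldl (fun partials ch =>
      partials.foldl (fun nxt pr =>
        let nxt := nxt ++ [(pr.1 ++ [ch], pr.2)]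
        if pr.2 > 0 then
          (nucleotides.filter (fun c => c != ch)).foldl
            (fun nxt2 c => nxt2 ++ [(pr.1 ++ [c], pr.2 - 1)]) nxt
        else nxt) []) partials
  PySem.List.sorted (partials.map (fun pr => String.ofList pr.1)) (fun x => x) false

-- ===== PRECONDITION & SPEC =====
-- Pre_ excludes exactly the inputs on which A raises ValueError: the empty sequence and a
-- negative distance.
def Pre_generate_d_neighbourhood (sequence : String) (distance : Int) : Prop :=
  sequence.toList ≠ [] ∧ 0 ≤ distance
instance (sequence : String) (distance : Int) : Decidable (Pre_generate_d_neighbourhood sequence distance) := by unfold Pre_generate_d_neighbourhood; infer_instance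

def pvWitness_generate_d_neighbourhood : String × Int := ("AT", 1)

def Spec_generate_d_neighbourhood (sequence : String) (distance : Int) (out : List String) : Prop := out = generate_d_neighbourhood_alt sequence distance
instance (sequence : String) (distance : Int) (out : List String) : Decidable (Spec_generate_d_neighbourhood sequence distance out) := by unfold Spec_generate_d_neighbourhood; infer_instance

-- ===== CLAIM (what is proved, stated in full; the proofs are below) =====
def Claim_equal_generate_d_neighbourhood : Prop := ∀ (sequence : String) (distance : Int), Dom_generate_d_neighbourhood sequence distance → Pre_generate_d_neighbourhood sequence distance → Spec_generate_d_neighbourhood sequence distance (generate_d_neighbourhood sequence distance)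

-- ===== LEMMAS AND PROOFS =====

-- the nucleotide alphabet
def pvNucs : List Char := ['A', 'T', 'G', 'C']

-- t is obtained from s by substitutions whose new characters are nucleotides
def pvOk : List Char → List Char → Prop
  | [], t => t = []
  | x :: xs, t => ∃ y ys, t = y :: ys ∧ (y = x ∨ y ∈ pvNucs) ∧ pvOk xs ys

-- number of positions where t differs from s
def pvChg : List Char → List Char → Nat
  | [], _ => 0
  | _ :: _, [] => 0
  | x :: xs, y :: ys => (if y = x then 0 else 1) + pvChg xs ys

-- t is y with exactly one character replaced by a different nucleotide
def pvOneSub (y t : List Char) : Prop :=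
  ∃ pre a c suf, c ∈ pvNucs ∧ c ≠ a ∧ y = pre ++ a :: suf ∧ t = pre ++ c :: suf

def pvInvA (s : List Char) (k : Nat) (N : List String) : Prop :=
  N.Nodup ∧ ∀ u : String, u ∈ N ↔ (pvOk s u.toList ∧ pvChg s u.toList ≤ k)

def pvExpand (ch : Char) (pr : List Char × Nat) : List (List Char × Nat) :=
  (pr.1 ++ [ch], pr.2) ::
    (if 0 < pr.2 then (pvNucs.filter (fun c => c != ch)).map (fun c => (pr.1 ++ [c], pr.2 - 1))
     else [])

def pvInvB (cs : List Char) (R : Nat) (parts : List (List Char × Nat)) : Prop :=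
  (parts.map Prod.fst).Nodup ∧ ∀ p b, ((p, b) ∈ parts ↔ (pvOk cs p ∧ b + pvChg cs p = R))

def pvStepA (nb : List String) : List String :=
  PySem.Set.ofList (nb ++ nb.foldl (fun cur seq => cur ++ generate_direct_neighbours seq) [])

def pvStepB (parts : List (List Char × Nat)) (ch : Char) : List (List Char × Nat) :=
  parts.foldl (fun nxt pr =>
    let nxt := nxt ++ [(pr.1 ++ [ch], pr.2)]
    if pr.2 > 0 then
      ((['A', 'T', 'G', 'C'] : List Char).filter (fun c => c != ch)).foldl
        (fun nxt2 c => nxt2 ++ [(pr.1 ++ [c], pr.2 - 1)]) nxt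
    else nxt) []

lemma pvOk_length : ∀ s t : List Char, pvOk s t → t.length = s.length := by
  intro s
  induction s with
  | nil => intro t h; simp only [pvOk] at h; simp [h]
  | cons x xs ih =>
    intro t h; simp only [pvOk] at h
    obtain ⟨y, ys, rfl, _, h2⟩ := h
    simp [ih ys h2]

lemma pvChg_le : ∀ s t : List Char, pvChg s t ≤ s.length := by
  intro s
  induction s with
  | nil => intro t; simp [pvChg]
  | cons x xs ih =>
    intro t
    cases t with
    | nil => simp [pvChg]
    | cons y ys =>
      have := ih ys
      simp only [pvChg, List.length_cons]
      split <;> omega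

lemma pvOk_refl : ∀ s : List Char, pvOk s s := by
  intro s
  induction s with
  | nil => simp [pvOk]
  | cons x xs ih => exact ⟨x, xs, rfl, Or.inl rfl, ih⟩

lemma pvChg_self : ∀ s : List Char, pvChg s s = 0 := by
  intro s
  induction s with
  | nil => simp [pvChg]
  | cons x xs ih => simp [pvChg, ih]

lemma pvChg_zero : ∀ s t : List Char, pvOk s t → pvChg s t = 0 → t = s := by
  intro s
  induction s with
  | nil => intro t h _; simpa [pvOk] using h
  | cons x xs ih =>
    intro t h hc
    simp only [pvOk] at h
    obtain ⟨y, ys, rfl, hcond, hok⟩ := h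
    by_cases hyx : y = x
    · subst hyx
      simp [pvChg] at hc
      rw [ih ys hok hc]
    · simp only [pvChg, if_neg hyx] at hc
      omega

lemma pvOk_append : ∀ (xs : List Char) (x : Char) (t : List Char),
    pvOk (xs ++ [x]) t ↔ ∃ p y, t = p ++ [y] ∧ pvOk xs p ∧ (y = x ∨ y ∈ pvNucs) := by
  intro xs
  induction xs with
  | nil =>
    intro x t
    constructor
    · rintro ⟨y, ys, rfl, hc, hys⟩
      simp only [pvOk] at hys
      subst hys
      exact ⟨[], y, rfl, by simp [pvOk], hc⟩
    · rintro ⟨p, y, rfl, hp, hc⟩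
      simp only [pvOk] at hp
      subst hp
      exact ⟨y, [], rfl, hc, by simp [pvOk]⟩
  | cons a xs ih =>
    intro x t
    constructor
    · rintro ⟨y, ys, rfl, hc, hys⟩
      obtain ⟨p, z, rfl, hp, hz⟩ := (ih x ys).mp hys
      exact ⟨y :: p, z, rfl, ⟨y, p, rfl, hc, hp⟩, hz⟩
    · rintro ⟨p, y, rfl, hp, hc⟩
      obtain ⟨z, zs, rfl, hcz, hok⟩ := hp
      exact ⟨z, zs ++ [y], rfl, hcz, (ih x _).mpr ⟨zs, y, rfl, hok, hc⟩⟩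

lemma pvChg_append : ∀ (xs p : List Char) (x y : Char), p.length = xs.length →
    pvChg (xs ++ [x]) (p ++ [y]) = pvChg xs p + (if y = x then 0 else 1) := by
  intro xs
  induction xs with
  | nil =>
    intro p x y hlen
    have : p = [] := List.eq_nil_of_length_eq_zero (by simpa using hlen)
    subst this
    simp [pvChg]
  | cons a xs ih =>
    intro p x y hlen
    cases p with
    | nil => simp at hlen
    | cons b p' =>
      have hlen' : p'.length = xs.length := by simpa using hlen
      simp only [List.cons_append, pvChg]
      rw [ih p' x y hlen']
      omega

lemma pvForward : ∀ (pre : List Char) (suf : List Char) (a c : Char) (s : List Char),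
    c ∈ pvNucs → c ≠ a → pvOk s (pre ++ a :: suf) →
    pvOk s (pre ++ c :: suf) ∧ pvChg s (pre ++ c :: suf) ≤ pvChg s (pre ++ a :: suf) + 1 := by
  intro pre
  induction pre with
  | nil =>
    intro suf a c s hc hca h
    cases s with
    | nil => simp [pvOk] at h
    | cons x xs =>
      obtain ⟨y, ys, heq, hcond, hok⟩ := h
      rw [List.nil_append] at heq
      cases heq
      refine ⟨⟨c, suf, rfl, Or.inr hc, hok⟩, ?_⟩
      simp only [List.nil_append, pvChg]
      split_ifs <;> omega
  | cons z pre' ih =>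
    intro suf a c s hc hca h
    cases s with
    | nil => simp [pvOk] at h
    | cons x xs =>
      obtain ⟨y, ys, heq, hcond, hok⟩ := h
      rw [List.cons_append] at heq
      cases heq
      obtain ⟨hok', hchg'⟩ := ih suf a c xs hc hca hok
      refine ⟨⟨z, pre' ++ c :: suf, rfl, hcond, hok'⟩, ?_⟩
      simp only [List.cons_append, pvChg]
      split_ifs <;> omega

lemma pvRevert : ∀ (s t : List Char), pvOk s t → 0 < pvChg s t →
    ∃ y, pvOk s y ∧ pvChg s y + 1 = pvChg s t ∧ pvOneSub y t := by
  intro s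
  induction s with
  | nil =>
    intro t h hc
    simp only [pvOk] at h
    subst h
    simp [pvChg] at hc
  | cons x xs ih =>
    intro t h hc
    obtain ⟨y, ys, rfl, hcond, hok⟩ := h
    by_cases hyx : y = x
    · subst hyx
      simp [pvChg] at hc
      obtain ⟨y', hok', hchg', pre, a, c, suf, h1, h2, h3, h4⟩ := ih ys hok hc
      refine ⟨y :: y', ⟨y, y', rfl, Or.inl rfl, hok'⟩, ?_, y :: pre, a, c, suf, h1, h2, by rw [h3]; rfl, by rw [h4]; rfl⟩
      simp [pvChg]
      omega
    · have hyn : y ∈ pvNucs := hcond.resolve_left hyx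
      refine ⟨x :: ys, ⟨x, ys, rfl, Or.inl rfl, hok⟩, ?_, [], x, y, ys, hyn, hyx, rfl, rfl⟩
      simp [pvChg, hyx]
      omega

lemma pvSucc : ∀ (s t : List Char) (k : Nat),
    (pvOk s t ∧ pvChg s t ≤ k + 1) ↔
      ((pvOk s t ∧ pvChg s t ≤ k) ∨
        ∃ y, (pvOk s y ∧ pvChg s y ≤ k) ∧ (t = y ∨ pvOneSub y t)) := by
  intro s t k
  constructor
  · rintro ⟨hok, hle⟩
    by_cases h : pvChg s t ≤ k
    · exact Or.inl ⟨hok, h⟩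
    · obtain ⟨y, hoky, hchg, hsub⟩ := pvRevert s t hok (by omega)
      exact Or.inr ⟨y, ⟨hoky, by omega⟩, Or.inr hsub⟩
  · rintro (⟨hok, hle⟩ | ⟨y, ⟨hoky, hley⟩, (rfl | hsub)⟩)
    · exact ⟨hok, by omega⟩
    · exact ⟨hoky, by omega⟩
    · obtain ⟨pre, a, c, suf, hc, hca, rfl, rfl⟩ := hsub
      obtain ⟨h1, h2⟩ := pvForward pre suf a c s hc hca hoky
      exact ⟨h1, by omega⟩

lemma pv_set_decomp : ∀ (pre : List Char) (a c : Char) (suf : List Char),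
    (pre ++ a :: suf).set pre.length c = pre ++ c :: suf := by
  intro pre a c suf
  induction pre with
  | nil => simp
  | cons z r ih => simp [ih]

lemma pv_getElem?_decomp : ∀ (pre : List Char) (a : Char) (suf : List Char),
    (pre ++ a :: suf)[pre.length]? = some a := by
  intro pre a suf
  simp

-- membership in A's helper: the sequence itself or one substitution by a different nucleotide
lemma pv_mem_direct (y u : String) :
    u ∈ generate_direct_neighbours y ↔ (u = y ∨ pvOneSub y.toList u.toList) := by
  have hdn : generate_direct_neighbours y =
      PySem.List.sorted
        (y :: (PySem.List.enumerate y.toList 0).flatMap (fun pn =>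
          ((['A', 'T', 'G', 'C'] : List Char).filter (fun candidate => candidate != pn.2)).map
            (fun candidate => String.ofList (PySem.List.pySetD y.toList pn.1 candidate))))
        (fun x => x) false := by
    unfold generate_direct_neighbours
    have h1 : (fun (acc : List String) (pn : Int × Char) =>
        ((['A', 'T', 'G', 'C'] : List Char).filter (fun candidate => candidate != pn.2)).foldl
          (fun acc2 candidate => acc2 ++ [String.ofList (PySem.List.pySetD y.toList pn.1 candidate)]) acc)
        = fun acc pn => acc ++
            ((['A', 'T', 'G', 'C'] : List Char).filter (fun candidate => candidate != pn.2)).map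
              (fun candidate => String.ofList (PySem.List.pySetD y.toList pn.1 candidate)) := by
      funext acc pn
      exact PySem.List.foldl_append_singleton_eq_map _ _ _
    show PySem.List.sorted
        ((PySem.List.enumerate y.toList 0).foldl (fun acc pn =>
          ((['A', 'T', 'G', 'C'] : List Char).filter (fun candidate => candidate != pn.2)).foldl
            (fun acc2 candidate => acc2 ++ [String.ofList (PySem.List.pySetD y.toList pn.1 candidate)]) acc) [y])
        (fun x => x) false = _
    rw [h1, PySem.List.foldl_append_eq_flatMap]
    simp
  rw [hdn, PySem.List.mem_sorted]
  simp only [List.mem_cons, List.mem_flatMap, List.mem_map, List.mem_filter,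
    PySem.List.mem_enumerate_iff]
  constructor
  · rintro (rfl | ⟨pn, ⟨k, hk, rfl⟩, candidate, ⟨hcn, hne⟩, rfl⟩)
    · exact Or.inl rfl
    · right
      have hset : PySem.List.pySetD y.toList ((0 : Int) + (k : Int)) candidate
          = y.toList.set k candidate := by
        rw [Int.zero_add]
        exact PySem.List.pySetD_natCast _ _ _
      refine ⟨y.toList.take k, y.toList[k], candidate, y.toList.drop (k + 1), by simpa [pvNucs] using hcn, ?_, ?_, ?_⟩
      · simpa [bne_iff_ne] using hne
      · rw [List.getElem_cons_drop, List.take_append_drop]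
      · rw [hset, List.set_eq_take_append_cons_drop, if_pos hk]
        simp
  · rintro (rfl | ⟨pre, a, c, suf, hc, hca, hy, hu⟩)
    · exact Or.inl rfl
    · right
      have hklen : pre.length < y.toList.length := by
        rw [hy]; simp
      have hget : y.toList[pre.length] = a := by
        have h1 : y.toList[pre.length]? = some a := by
          rw [hy]; exact pv_getElem?_decomp pre a suf
        rw [List.getElem?_eq_getElem hklen] at h1
        exact Option.some.inj h1
      refine ⟨((0 : Int) + (pre.length : Int), y.toList[pre.length]), ⟨pre.length, hklen, rfl⟩,
        c, ⟨by simpa [pvNucs] using hc, by simp [bne_iff_ne, hget, hca]⟩, ?_⟩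
      have hset : PySem.List.pySetD y.toList ((0 : Int) + (pre.length : Int)) c
          = y.toList.set pre.length c := by
        rw [Int.zero_add]
        exact PySem.List.pySetD_natCast _ _ _
      rw [hset, hy, pv_set_decomp, ← hu]
      simp

lemma pvStepA_eq (nb : List String) :
    pvStepA nb = PySem.Set.ofList (nb ++ nb.flatMap generate_direct_neighbours) := by
  unfold pvStepA
  rw [PySem.List.foldl_append_eq_flatMap]
  simp

lemma pvStepA_inv {s : List Char} {k : Nat} {N : List String} (h : pvInvA s k N) :
    pvInvA s (k + 1) (pvStepA N) := by
  obtain ⟨hnd, hmem⟩ := h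
  constructor
  · rw [pvStepA_eq]; exact PySem.Set.nodup_ofList _
  · intro u
    rw [pvStepA_eq, PySem.Set.mem_ofList]
    simp only [List.mem_append, List.mem_flatMap]
    rw [pvSucc]
    constructor
    · rintro (hu | ⟨y, hyN, hudn⟩)
      · exact Or.inl ((hmem u).mp hu)
      · rcases (pv_mem_direct y u).mp hudn with rfl | hsub
        · exact Or.inl ((hmem u).mp hyN)
        · exact Or.inr ⟨y.toList, (hmem y).mp hyN, Or.inr hsub⟩
    · rintro (h1 | ⟨t, ⟨hokt, hlet⟩, ht⟩)
      · exact Or.inl ((hmem u).mpr h1)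
      · right
        refine ⟨String.ofList t, (hmem _).mpr (by simpa using ⟨hokt, hlet⟩), ?_⟩
        apply (pv_mem_direct _ _).mpr
        rcases ht with h | h
        · left
          have : u.toList = (String.ofList t).toList := by simpa using h
          exact String.toList_inj.mp this
        · right
          simpa using h

lemma pvA_fold (s : List Char) : ∀ (l : List Int) (N : List String) (k : Nat),
    pvInvA s k N → pvInvA s (k + l.length) (l.foldl (fun nb _ => pvStepA nb) N) := by
  intro l
  induction l with
  | nil => intro N k h; simpa using h
  | cons a l ih =>
    intro N k h
    have := ih (pvStepA N) (k + 1) (pvStepA_inv h)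
    simpa [List.foldl_cons, Nat.add_assoc, Nat.add_comm 1 l.length] using this

lemma pvStepB_eq (parts : List (List Char × Nat)) (ch : Char) :
    pvStepB parts ch = parts.flatMap (pvExpand ch) := by
  unfold pvStepB
  have hb : (fun (nxt : List (List Char × Nat)) (pr : List Char × Nat) =>
      let nxt := nxt ++ [(pr.1 ++ [ch], pr.2)]
      if pr.2 > 0 then
        ((['A', 'T', 'G', 'C'] : List Char).filter (fun c => c != ch)).foldl
          (fun nxt2 c => nxt2 ++ [(pr.1 ++ [c], pr.2 - 1)]) nxt
      else nxt)
      = fun nxt pr => nxt ++ pvExpand ch pr := by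
    funext nxt pr
    by_cases h : 0 < pr.2
    · simp only [h, if_pos]
      rw [PySem.List.foldl_append_singleton_eq_map]
      simp [pvExpand, h, pvNucs, List.append_assoc]
    · simp [pvExpand, h]
  rw [hb, PySem.List.foldl_append_eq_flatMap]
  simp

lemma pvExpand_mem (ch : Char) (pr : List Char × Nat) (q : List Char × Nat) :
    q ∈ pvExpand ch pr ↔
      q = (pr.1 ++ [ch], pr.2) ∨
        (0 < pr.2 ∧ ∃ c, c ∈ pvNucs ∧ c ≠ ch ∧ q = (pr.1 ++ [c], pr.2 - 1)) := by
  by_cases h : 0 < pr.2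
  · simp only [pvExpand, if_pos h, List.mem_cons, List.mem_map, List.mem_filter, bne_iff_ne]
    constructor
    · rintro (rfl | ⟨c, ⟨hcn, hne⟩, rfl⟩)
      · exact Or.inl rfl
      · exact Or.inr ⟨h, c, hcn, hne, rfl⟩
    · rintro (rfl | ⟨_, c, hcn, hne, rfl⟩)
      · exact Or.inl rfl
      · exact Or.inr ⟨c, ⟨hcn, hne⟩, rfl⟩
  · simp [pvExpand, h]

lemma pvExpand_fst_shape (ch : Char) (pr : List Char × Nat) (q : List Char × Nat)
    (h : q ∈ pvExpand ch pr) : ∃ c, q.1 = pr.1 ++ [c] := by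
  rcases (pvExpand_mem ch pr q).mp h with rfl | ⟨_, c, _, _, rfl⟩
  · exact ⟨ch, rfl⟩
  · exact ⟨c, rfl⟩

lemma pvStepB_inv {cs : List Char} {R : Nat} {parts : List (List Char × Nat)} (ch : Char)
    (h : pvInvB cs R parts) : pvInvB (cs ++ [ch]) R (parts.flatMap (pvExpand ch)) := by
  obtain ⟨hnd, hmem⟩ := h
  have hlen : ∀ p b, (p, b) ∈ parts → p.length = cs.length := by
    intro p b hpb
    exact pvOk_length cs p ((hmem p b).mp hpb).1
  constructor
  · rw [List.map_flatMap, List.nodup_flatMap]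
    constructor
    · intro pr _
      by_cases h0 : 0 < pr.2
      · simp only [pvExpand, if_pos h0, List.map_cons, List.map_map]
        refine List.nodup_cons.mpr ⟨?_, ?_⟩
        · simp only [List.mem_map, List.mem_filter, bne_iff_ne, Function.comp_def]
          rintro ⟨c, ⟨_, hne⟩, hceq⟩
          exact hne (by simpa using List.append_cancel_left hceq)
        · refine List.Nodup.map ?_ (List.Nodup.filter _ (by decide : pvNucs.Nodup))
          intro c1 c2 hcc
          simpa using List.append_cancel_left hcc
      · simp [pvExpand, if_neg h0]
    · have hpair : parts.Pairwise (fun a b => a.1 ≠ b.1) := List.pairwise_map.mp hnd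
      refine List.Pairwise.imp_of_mem ?_ hpair
      intro a b ha hb hne
      intro q hqa hqb
      simp only [List.mem_map] at hqa hqb
      obtain ⟨qa, hqa', rfl⟩ := hqa
      obtain ⟨qb, hqb', hq⟩ := hqb
      obtain ⟨ca, hca⟩ := pvExpand_fst_shape ch a qa hqa'
      obtain ⟨cb, hcb⟩ := pvExpand_fst_shape ch b qb hqb'
      have hlena : a.1.length = cs.length := hlen a.1 a.2 (by simpa using ha)
      have hlenb : b.1.length = cs.length := hlen b.1 b.2 (by simpa using hb)
      have : a.1 ++ [ca] = b.1 ++ [cb] := by rw [← hca, ← hcb, hq]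
      exact hne (List.append_inj this (by omega)).1
  · intro p b
    rw [List.mem_flatMap]
    constructor
    · rintro ⟨pr, hpr, hq⟩
      obtain ⟨hokpr, hbpr⟩ := (hmem pr.1 pr.2).mp (by simpa using hpr)
      have hlenpr : pr.1.length = cs.length := pvOk_length cs pr.1 hokpr
      rcases (pvExpand_mem ch pr (p, b)).mp hq with heq | ⟨h0, c, hcn, hne, heq⟩
      · injection heq with h1 h2
        subst h1; subst h2
        refine ⟨(pvOk_append cs ch _).mpr ⟨pr.1, ch, rfl, hokpr, Or.inl rfl⟩, ?_⟩
        rw [pvChg_append cs pr.1 ch ch hlenpr, if_pos rfl]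
        omega
      · injection heq with h1 h2
        subst h1; subst h2
        refine ⟨(pvOk_append cs ch _).mpr ⟨pr.1, c, rfl, hokpr, Or.inr hcn⟩, ?_⟩
        rw [pvChg_append cs pr.1 ch c hlenpr, if_neg hne]
        omega
    · rintro ⟨hok, hchg⟩
      obtain ⟨p', y, rfl, hokp', hy⟩ := (pvOk_append cs ch p).mp hok
      have hlenp' : p'.length = cs.length := pvOk_length cs p' hokp'
      rw [pvChg_append cs p' ch y hlenp'] at hchg
      by_cases hych : y = ch
      · subst hych
        rw [if_pos rfl] at hchg
        refine ⟨(p', b), (hmem p' b).mpr ⟨hokp', by omega⟩, ?_⟩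
        exact (pvExpand_mem _ _ _).mpr (Or.inl rfl)
      · have hyn : y ∈ pvNucs := hy.resolve_left hych
        rw [if_neg hych] at hchg
        refine ⟨(p', b + 1), (hmem p' (b + 1)).mpr ⟨hokp', by omega⟩, ?_⟩
        exact (pvExpand_mem _ _ _).mpr (Or.inr ⟨by omega, y, hyn, hych, by simp⟩)

lemma pvB_fold (cs : List Char) (R : Nat) :
    pvInvB cs R (cs.foldl pvStepB [([], R)]) := by
  induction cs using List.reverseRecOn with
  | nil =>
    constructor
    · simp
    · intro p b
      constructor
      · intro hpb
        have h1 : p = [] ∧ b = R := by simpa [Prod.ext_iff] using hpb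
        obtain ⟨rfl, rfl⟩ := h1
        refine ⟨by simp [pvOk], by simp [pvChg]⟩
      · rintro ⟨hp, hb⟩
        simp only [pvOk] at hp
        subst hp
        simp [pvChg] at hb
        subst hb
        simp
  | append_singleton cs ch ih =>
    rw [List.foldl_append, List.foldl_cons, List.foldl_nil, pvStepB_eq]
    exact pvStepB_inv ch ih

lemma pvA_base (s : String) : pvInvA s.toList 0 [s] := by
  constructor
  · simp
  · intro u
    simp only [List.mem_singleton]
    constructor
    · rintro rfl
      exact ⟨pvOk_refl _, by simp [pvChg_self]⟩
    · rintro ⟨hok, hchg⟩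
      have h0 : pvChg s.toList u.toList = 0 := by omega
      exact String.toList_inj.mp (pvChg_zero _ _ hok h0)

theorem pv_main (s : String) (d : Int) (hd : 0 ≤ d) :
    generate_d_neighbourhood s d = generate_d_neighbourhood_alt s d := by
  have hBdef : generate_d_neighbourhood_alt s d =
      PySem.List.sorted
        ((s.toList.foldl pvStepB [([], min d.toNat s.toList.length)]).map
          (fun pr => String.ofList pr.1)) (fun x => x) false := rfl
  have hB := pvB_fold s.toList (min d.toNat s.toList.length)
  set parts := s.toList.foldl pvStepB [([], min d.toNat s.toList.length)] with hpartsdef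
  set Lb := parts.map (fun pr => String.ofList pr.1) with hLbdef
  have hinj : Function.Injective String.ofList := by
    intro a b h
    have := congrArg String.toList h
    simpa using this
  have hNbNodup : Lb.Nodup := by
    have heq : Lb = (parts.map Prod.fst).map String.ofList := by
      rw [hLbdef, List.map_map]; rfl
    rw [heq]
    exact hB.1.map hinj
  have hmemLb : ∀ u : String, u ∈ Lb ↔
      (pvOk s.toList u.toList ∧ pvChg s.toList u.toList ≤ d.toNat) := by
    intro u
    rw [hLbdef, List.mem_map]
    constructor
    · rintro ⟨pr, hpr, rfl⟩
      obtain ⟨hok, hbc⟩ := (hB.2 pr.1 pr.2).mp (by simpa using hpr)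
      constructor
      · simpa using hok
      · have h1 : pvChg s.toList pr.1 ≤ d.toNat := by omega
        simpa using h1
    · rintro ⟨hok, hle⟩
      have hlen2 : pvChg s.toList u.toList ≤ s.toList.length := pvChg_le _ _
      refine ⟨(u.toList, min d.toNat s.toList.length - pvChg s.toList u.toList),
        (hB.2 _ _).mpr ⟨hok, by omega⟩, ?_⟩
      simp
  by_cases hd0 : d = 0
  · subst hd0
    have hmem0 : ∀ u : String, u ∈ [s] ↔ u ∈ Lb := by
      intro u
      rw [(pvA_base s).2 u, hmemLb u]
      constructor <;> rintro ⟨h1, h2⟩ <;> exact ⟨h1, by omega⟩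
    have hperm : List.Perm [s] Lb :=
      (List.perm_ext_iff_of_nodup (by simp) hNbNodup).mpr hmem0
    rw [show generate_d_neighbourhood s 0 = [s] from rfl, hBdef]
    exact (PySem.List.sorted_eq_of_perm_of_pairwise_lt Lb [s] (fun x => x) hperm (by simp)).symm
  · have hA : generate_d_neighbourhood s d =
        PySem.List.sorted
          ((PySem.List.pyRange 0 d 1).foldl (fun nb _ => pvStepA nb) [s]) (fun x => x) false := by
      unfold generate_d_neighbourhood
      rw [if_neg (by simpa using hd0)]
      rfl
    have hAinv := pvA_fold s.toList (PySem.List.pyRange 0 d 1) [s] 0 (pvA_base s)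
    have hrlen : (PySem.List.pyRange 0 d 1).length = d.toNat := by
      simp [PySem.List.length_pyRange_one]
    rw [hrlen, Nat.zero_add] at hAinv
    have hperm : List.Perm ((PySem.List.pyRange 0 d 1).foldl (fun nb _ => pvStepA nb) [s]) Lb :=
      (List.perm_ext_iff_of_nodup hAinv.1 hNbNodup).mpr
        (fun u => (hAinv.2 u).trans (hmemLb u).symm)
    rw [hA, hBdef]
    exact PySem.List.sorted_eq_sorted_of_perm _ _ (fun x => x) (fun a b h => h) hperm

-- ===== VERDICT (by name: the statement is the Claim_ definition above) =====
theorem generate_d_neighbourhood_spec : Claim_equal_generate_d_neighbourhood := by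
  intro sequence distance _ hpre
  exact pv_main sequence distance hpre.2
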